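-- pv_equiv track=rewrite | github.com/Yash02102/FutureBase | agentic-hackathon/src/rules/commerce.py | _pick_intent
-- ===== SOURCE A (Python) =====
-- from typing import Dict, List, Optional
--
-- _INTENT_PRIORITY = [
--     "refund_request",
--     "return_request",
--     "track_order",
--     "reorder",
--     "purchase",
--     "compare_products",
--     "support_ticket",
--     "product_search",
--     "address_change",
-- ]
--
-- def _pick_intent(scores: Dict[str, int]) -> tuple[str, int]:
--     best_intent = ""
--     best_score = 0
--     for intent, score in scores.items():
--         if score > best_score:
--             best_intent = intent
--             best_score = score
--     if not best_intent:
--         return "general", 0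
--     tied = [intent for intent, score in scores.items() if score == best_score]
--     if len(tied) > 1:
--         for intent in _INTENT_PRIORITY:
--             if intent in tied:
--                 return intent, best_score
--     return best_intent, best_score
-- ===== SOURCE B (Python) =====
-- _INTENT_PRIORITY = [
--     "refund_request",
--     "return_request",
--     "track_order",
--     "reorder",
--     "purchase",
--     "compare_products",
--     "support_ticket",
--     "product_search",
--     "address_change",
-- ]
--
-- def _pick_intent(scores):
--     n = len(_INTENT_PRIORITY)
--     rank = {name: i for i, name in enumerate(_INTENT_PRIORITY)}
--     best = max(scores.items(), key=lambda kv: (kv[1], -rank.get(kv[0], n)), default=None)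
--     if best is None or best[1] <= 0:
--         return "general", 0
--     return best[0], best[1]
-- ===== Notes on version B (the rewrite author's own statement) =====
-- stated objective: idiomatic
-- what changed: A's three passes (running-max loop, tied-list comprehension, scan of the priority list) are replaced by a single keyed argmax: max over scores.items() with key (score, -rank) using a precomputed intent-to-rank dict, with a guard when there is no positive score.
-- intended difference: On inputs whose first maximal score is positive but carried by the empty-string intent, A's truthiness test `if not best_intent` misfires and A returns ('general', 0) although a positive winner exists; B returns that actual highest-scoring item, which is the intended argmax. — e.g. on _pick_intent([("", 5), ("purchase", 5)]): A returns ("general", 0), B returns ("purchase", 5)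
import Mathlib
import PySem

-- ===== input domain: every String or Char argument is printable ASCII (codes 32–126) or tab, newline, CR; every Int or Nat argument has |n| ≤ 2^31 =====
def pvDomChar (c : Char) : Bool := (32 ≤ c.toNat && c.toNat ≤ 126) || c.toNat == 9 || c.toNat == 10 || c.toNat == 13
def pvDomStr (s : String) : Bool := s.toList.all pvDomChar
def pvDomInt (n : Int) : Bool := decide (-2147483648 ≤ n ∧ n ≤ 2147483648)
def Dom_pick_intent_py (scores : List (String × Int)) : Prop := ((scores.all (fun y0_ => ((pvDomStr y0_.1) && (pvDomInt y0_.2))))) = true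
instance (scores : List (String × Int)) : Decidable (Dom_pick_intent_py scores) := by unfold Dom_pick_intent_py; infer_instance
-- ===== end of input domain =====

-- B replaces A's max-pass + tied-list + priority-scan with one keyed argmax (max with a
-- (score, -priority-rank) key over a precomputed rank dict): idiomatic single-pass selection.

def pvPriority : List String :=
  ["refund_request", "return_request", "track_order", "reorder", "purchase",
   "compare_products", "support_ticket", "product_search", "address_change"]

-- ===== PORT A =====
def pick_intent_py (scores : List (String × Int)) : String × Int :=
  -- best = (best_intent, best_score), updated together exactly as the two variables in A
  let best := scores.foldl (fun (b : String × Int) (p : String × Int) => if b.2 < p.2 then p else b) ("", 0)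
  if best.1 = "" then ("general", 0)
  else
    let tied := (scores.filter (fun p => p.2 == best.2)).map Prod.fst
    if 1 < tied.length then
      match pvPriority.find? (fun intent => tied.contains intent) with
      | some intent => (intent, best.2)
      | none => best
    else best

-- ===== PORT B =====
-- rank = {name: i for i, name in enumerate(_INTENT_PRIORITY)}
def pvRank : PySem.Dict String Int :=
  (PySem.List.enumerate pvPriority).foldl (fun d p => PySem.Dict.insert d p.2 p.1) PySem.Dict.empty

def pick_intent_py_alt (scores : List (String × Int)) : String × Int :=
  let n : Int := (pvPriority.length : Int)
  match PySem.List.max2? scores (fun kv => kv.2) (fun kv => -(PySem.Dict.getD pvRank kv.1 n)) with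
  | none => ("general", 0)               -- best is None
  | some best => if best.2 ≤ 0 then ("general", 0) else (best.1, best.2)

-- ===== PRECONDITION & SPEC =====
-- On inputs whose first maximal score is positive and carried by the empty-string intent, A's
-- truthiness test `if not best_intent` misfires and A returns ("general", 0) although a positive
-- winner exists; B returns the actual highest-scoring item, which is the intended argmax.
def D_pick_intent_py (scores : List (String × Int)) : Prop :=
  (scores.find? (fun p => scores.all (fun q => q.2 ≤ p.2))).any (fun p => p.1 == "" && 0 < p.2) = true
instance (scores : List (String × Int)) : Decidable (D_pick_intent_py scores) := by
  unfold D_pick_intent_py; infer_instance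

def Spec_pick_intent_py (scores : List (String × Int)) (out : String × Int) : Prop :=
  ¬ D_pick_intent_py scores → out = pick_intent_py_alt scores
instance (scores : List (String × Int)) (out : String × Int) : Decidable (Spec_pick_intent_py scores out) := by
  unfold Spec_pick_intent_py; infer_instance

def pvDiffWitness_pick_intent_py : (List (String × Int)) := [("", 5), ("purchase", 5)]
def pvDiffWitnessOut_pick_intent_py : (String × Int) × (String × Int) := (("general", 0), ("purchase", 5))

-- ===== CLAIM (what is proved, stated in full; the proofs are below) =====
def Claim_unchanged_pick_intent_py : Prop := ∀ (scores : List (String × Int)), Dom_pick_intent_py scores → Spec_pick_intent_py scores (pick_intent_py scores)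
def Claim_changed_pick_intent_py : Prop := Dom_pick_intent_py (pvDiffWitness_pick_intent_py) ∧ D_pick_intent_py (pvDiffWitness_pick_intent_py) ∧ pick_intent_py (pvDiffWitness_pick_intent_py) = pvDiffWitnessOut_pick_intent_py.1 ∧ pick_intent_py_alt (pvDiffWitness_pick_intent_py) = pvDiffWitnessOut_pick_intent_py.2 ∧ pvDiffWitnessOut_pick_intent_py.1 ≠ pvDiffWitnessOut_pick_intent_py.2
def Claim_exact_pick_intent_py : Prop := ∀ (scores : List (String × Int)), Dom_pick_intent_py scores → D_pick_intent_py scores → pick_intent_py scores ≠ pick_intent_py_alt scores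

-- ===== LEMMAS AND PROOFS =====

-- rk s = rank.get(s, 9) written out; pvRank is the literal 9-entry dict.
def rk (s : String) : Int :=
  if s = "refund_request" then 0 else if s = "return_request" then 1 else if s = "track_order" then 2
  else if s = "reorder" then 3 else if s = "purchase" then 4 else if s = "compare_products" then 5
  else if s = "support_ticket" then 6 else if s = "product_search" then 7
  else if s = "address_change" then 8 else 9

set_option maxHeartbeats 2000000 in
theorem rk_eq (s : String) : PySem.Dict.getD pvRank s ((pvPriority.length : Nat) : Int) = rk s := by
  have h : pvRank = PySem.Dict.mk [("refund_request",0),("return_request",1),("track_order",2),("reorder",3),("purchase",4),("compare_products",5),("support_ticket",6),("product_search",7),("address_change",8)] := by decide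
  rw [h]
  simp only [PySem.Dict.getD, PySem.Dict.get?_mk_cons, pvPriority]
  unfold rk
  split_ifs <;> simp_all <;> rfl

def Klt (a b : String × Int) : Prop := a.2 < b.2 ∨ (a.2 = b.2 ∧ rk b.1 < rk a.1)
theorem Klt_irrefl (a : String × Int) : ¬ Klt a a := by unfold Klt; omega
theorem Klt_trans {a b c : String × Int} (h1 : Klt a b) (h2 : Klt b c) : Klt a c := by
  unfold Klt at *; omega
theorem Klt_asymm {a b : String × Int} (h : Klt a b) : ¬ Klt b a := by unfold Klt at *; omega
theorem Klt_of_not_of {m x y : String × Int} (h1 : ¬ Klt m x) (h2 : Klt m y) : Klt x y := by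
  unfold Klt at *; omega

theorem cond_iff (m x : String × Int) :
    ((decide (m.2 < x.2) || !decide (x.2 < m.2) && decide (-(rk m.1) < -(rk x.1))) = true) ↔ Klt m x := by
  simp only [Bool.or_eq_true, decide_eq_true_eq, Bool.and_eq_true, Bool.not_eq_true',
    decide_eq_false_iff_not, Klt]
  omega

theorem foldB_char (l : List (String × Int)) (m : String × Int) :
    (l.foldl (fun (acc : Option (String × Int)) (x : String × Int) =>
        match acc with
        | none => some x
        | some mm => if (decide (mm.2 < x.2) || !decide (x.2 < mm.2) && decide (-(rk mm.1) < -(rk x.1))) then some x else some mm)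
      (some m) = some m ∧ ∀ p ∈ l, ¬ Klt m p)
  ∨ ∃ i : Fin l.length,
      l.foldl (fun (acc : Option (String × Int)) (x : String × Int) =>
        match acc with
        | none => some x
        | some mm => if (decide (mm.2 < x.2) || !decide (x.2 < mm.2) && decide (-(rk mm.1) < -(rk x.1))) then some x else some mm)
      (some m) = some l[i]
      ∧ Klt m l[i] ∧ (∀ j : Fin l.length, ¬ Klt l[i] l[j])
      ∧ (∀ j : Fin l.length, j.1 < i.1 → Klt l[j] l[i]) := by
  induction l generalizing m with
  | nil => exact Or.inl ⟨rfl, by simp⟩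
  | cons x t ih =>
    simp only [List.foldl_cons]
    by_cases hx : Klt m x
    · rw [if_pos ((cond_iff m x).2 hx)]
      rcases ih x with ⟨heq, hall⟩ | ⟨i, heq, hlt, hmax, hfirst⟩
      · refine Or.inr ⟨⟨0, by simp⟩, by simpa using heq, by simpa using hx, ?_, ?_⟩
        · rintro ⟨j, hj⟩
          match j, hj with
          | 0, _ => simpa using Klt_irrefl x
          | j+1, hj =>
            have hjt : j < t.length := by simpa using hj
            simpa using hall (t[j]'hjt) (List.getElem_mem hjt)
        · rintro ⟨j, hj⟩ h
          simp at h
      · refine Or.inr ⟨⟨i.1+1, by simpa using i.2⟩, by simpa using heq, ?_, ?_, ?_⟩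
        · simpa using Klt_trans hx hlt
        · rintro ⟨j, hj⟩
          match j, hj with
          | 0, _ => simpa using Klt_asymm hlt
          | j+1, hj => simpa using hmax ⟨j, by simpa using hj⟩
        · rintro ⟨j, hj⟩ h
          match j, hj with
          | 0, _ => simpa using hlt
          | j+1, hj =>
            have := hfirst ⟨j, by simpa using hj⟩ (by simp at h ⊢; omega)
            simpa using this
    · rw [if_neg (fun hc => hx ((cond_iff m x).1 hc))]
      rcases ih m with ⟨heq, hall⟩ | ⟨i, heq, hlt, hmax, hfirst⟩
      · refine Or.inl ⟨heq, ?_⟩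
        intro p hp
        rcases List.mem_cons.1 hp with rfl | hp
        · exact hx
        · exact hall p hp
      · refine Or.inr ⟨⟨i.1+1, by simpa using i.2⟩, by simpa using heq, by simpa using hlt, ?_, ?_⟩
        · rintro ⟨j, hj⟩
          match j, hj with
          | 0, _ => simpa using fun hc => hx (Klt_trans hlt hc)
          | j+1, hj => simpa using hmax ⟨j, by simpa using hj⟩
        · rintro ⟨j, hj⟩ h
          match j, hj with
          | 0, _ => simpa using Klt_of_not_of hx hlt
          | j+1, hj =>
            have := hfirst ⟨j, by simpa using hj⟩ (by simp at h ⊢; omega)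
            simpa using this

theorem foldA_char (l : List (String × Int)) (b : String × Int) :
    (l.foldl (fun (b : String × Int) (p : String × Int) => if b.2 < p.2 then p else b) b = b
        ∧ ∀ p ∈ l, p.2 ≤ b.2)
  ∨ ∃ i : Fin l.length,
      l.foldl (fun (b : String × Int) (p : String × Int) => if b.2 < p.2 then p else b) b = l[i]
      ∧ b.2 < (l[i]).2 ∧ (∀ j : Fin l.length, (l[j]).2 ≤ (l[i]).2)
      ∧ (∀ j : Fin l.length, j.1 < i.1 → (l[j]).2 < (l[i]).2) := by
  induction l generalizing b with
  | nil => exact Or.inl ⟨rfl, by simp⟩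
  | cons x t ih =>
    simp only [List.foldl_cons]
    by_cases hx : b.2 < x.2
    · rw [if_pos hx]
      rcases ih x with ⟨heq, hall⟩ | ⟨i, heq, hlt, hmax, hfirst⟩
      · refine Or.inr ⟨⟨0, by simp⟩, by simpa using heq, by simpa using hx, ?_, ?_⟩
        · rintro ⟨j, hj⟩
          match j, hj with
          | 0, _ => simp
          | j+1, hj =>
            have hjt : j < t.length := by simpa using hj
            simpa using hall (t[j]'hjt) (List.getElem_mem hjt)
        · rintro ⟨j, hj⟩ h
          simp at h
      · refine Or.inr ⟨⟨i.1+1, by simpa using i.2⟩, by simpa using heq, ?_, ?_, ?_⟩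
        · simpa using lt_trans hx hlt
        · rintro ⟨j, hj⟩
          match j, hj with
          | 0, _ => simpa using le_of_lt hlt
          | j+1, hj => simpa using hmax ⟨j, by simpa using hj⟩
        · rintro ⟨j, hj⟩ h
          match j, hj with
          | 0, _ => simpa using hlt
          | j+1, hj =>
            have := hfirst ⟨j, by simpa using hj⟩ (by simp at h ⊢; omega)
            simpa using this
    · rw [if_neg hx]
      rcases ih b with ⟨heq, hall⟩ | ⟨i, heq, hlt, hmax, hfirst⟩
      · refine Or.inl ⟨heq, ?_⟩
        intro p hp
        rcases List.mem_cons.1 hp with rfl | hp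
        · omega
        · exact hall p hp
      · refine Or.inr ⟨⟨i.1+1, by simpa using i.2⟩, by simpa using heq, by simpa using hlt, ?_, ?_⟩
        · rintro ⟨j, hj⟩
          match j, hj with
          | 0, _ => simpa using le_of_lt (lt_of_le_of_lt (le_of_not_gt hx) hlt)
          | j+1, hj => simpa using hmax ⟨j, by simpa using hj⟩
        · rintro ⟨j, hj⟩ h
          match j, hj with
          | 0, _ => simpa using lt_of_le_of_lt (le_of_not_gt hx) hlt
          | j+1, hj =>
            have := hfirst ⟨j, by simpa using hj⟩ (by simp at h ⊢; omega)
            simpa using this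

def stepB (acc : Option (String × Int)) (x : String × Int) : Option (String × Int) :=
  match acc with
  | none => some x
  | some mm => if (decide (mm.2 < x.2) || !decide (x.2 < mm.2) && decide (-(rk mm.1) < -(rk x.1))) then some x else some mm

theorem foldB_charS (l : List (String × Int)) (m : String × Int) :
    (l.foldl stepB (some m) = some m ∧ ∀ p ∈ l, ¬ Klt m p)
  ∨ ∃ i : Fin l.length,
      l.foldl stepB (some m) = some l[i]
      ∧ Klt m l[i] ∧ (∀ j : Fin l.length, ¬ Klt l[i] l[j])
      ∧ (∀ j : Fin l.length, j.1 < i.1 → Klt l[j] l[i]) := foldB_char l m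

theorem max2?_stepB (l : List (String × Int)) :
    PySem.List.max2? l (fun kv => kv.2) (fun kv => -(PySem.Dict.getD pvRank kv.1 ((pvPriority.length : Nat) : Int))) = l.foldl stepB none := by
  unfold PySem.List.max2?
  refine PySem.List.foldl_congr_mem _ _ _ _ ?_
  intro acc x hx
  cases acc with
  | none => rfl
  | some mm => simp only [stepB, rk_eq]

theorem maxB_char (l : List (String × Int)) (h : l ≠ []) :
    ∃ i : Fin l.length,
      PySem.List.max2? l (fun kv => kv.2) (fun kv => -(PySem.Dict.getD pvRank kv.1 ((pvPriority.length : Nat) : Int))) = some l[i]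
      ∧ (∀ j : Fin l.length, ¬ Klt l[i] l[j])
      ∧ (∀ j : Fin l.length, j.1 < i.1 → Klt l[j] l[i]) := by
  obtain ⟨x, t, rfl⟩ := List.exists_cons_of_ne_nil h
  rw [max2?_stepB, List.foldl_cons, show stepB none x = some x from rfl]
  rcases foldB_charS t x with ⟨heq, hall⟩ | ⟨i, heq, hlt, hmax, hfirst⟩
  · refine ⟨⟨0, by simp⟩, ?_, ?_, ?_⟩
    · simpa using heq
    · rintro ⟨j, hj⟩
      match j, hj with
      | 0, _ => simpa using Klt_irrefl x
      | j+1, hj =>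
        have hjt : j < t.length := by simpa using hj
        simpa using hall (t[j]'hjt) (List.getElem_mem hjt)
    · rintro ⟨j, hj⟩ h
      simp at h
  · refine ⟨⟨i.1+1, by simpa using i.2⟩, ?_, ?_, ?_⟩
    · simpa using heq
    · rintro ⟨j, hj⟩
      match j, hj with
      | 0, _ => simpa using Klt_asymm hlt
      | j+1, hj => simpa using hmax ⟨j, by simpa using hj⟩
    · rintro ⟨j, hj⟩ h
      match j, hj with
      | 0, _ => simpa using hlt
      | j+1, hj =>
        have := hfirst ⟨j, by simpa using hj⟩ (by simp at h ⊢; omega)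
        simpa using this

theorem rk_le_nine (s : String) : rk s ≤ 9 := by unfold rk; split_ifs <;> omega

theorem rk_lt_nine_mem {s : String} (h : rk s < 9) : s ∈ pvPriority := by
  unfold rk at h
  split_ifs at h <;> first | (subst_vars; decide) | omega

theorem mem_rk_lt {s : String} (h : s ∈ pvPriority) : rk s < 9 := by
  simp only [pvPriority, List.mem_cons, List.not_mem_nil, or_false] at h
  rcases h with rfl|rfl|rfl|rfl|rfl|rfl|rfl|rfl|rfl <;> decide

theorem rk_inj {a b : String} (ha : rk a < 9) (h : rk a = rk b) : a = b := by
  have hb := rk_lt_nine_mem (h ▸ ha)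
  have ha' := rk_lt_nine_mem ha
  simp only [pvPriority, List.mem_cons, List.not_mem_nil, or_false] at ha' hb
  rcases ha' with rfl|rfl|rfl|rfl|rfl|rfl|rfl|rfl|rfl <;>
    rcases hb with rfl|rfl|rfl|rfl|rfl|rfl|rfl|rfl|rfl <;> first | rfl | (exact absurd h (by decide))

theorem find?_rk_min {c : String → Bool} {p : String}
    (h : pvPriority.find? c = some p) :
    c p = true ∧ p ∈ pvPriority ∧ ∀ s, c s = true → s ∈ pvPriority → rk p ≤ rk s := by
  simp only [pvPriority, List.find?] at h
  repeat' split at h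
  all_goals simp only [reduceCtorEq, Option.some.injEq] at h
  all_goals (
    subst h
    refine ⟨by assumption, by decide, ?_⟩
    intro s hcs hmem
    simp only [pvPriority, List.mem_cons, List.not_mem_nil, or_false] at hmem
    rcases hmem with rfl|rfl|rfl|rfl|rfl|rfl|rfl|rfl|rfl <;> first | decide | simp_all)


theorem tied_singleton {α : Type} {L : List α} (h : L.length ≤ 1) {a b : α}
    (ha : a ∈ L) (hb : b ∈ L) : a = b := by
  match L, h with
  | [], _ => simp at ha
  | [x], _ =>
    simp only [List.mem_singleton] at ha hb
    rw [ha, hb]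

theorem D_iff (scores : List (String × Int)) :
    D_pick_intent_py scores ↔ ∃ i : Fin scores.length, (scores[i]).1 = "" ∧ 0 < (scores[i]).2 ∧
      (∀ j : Fin scores.length, (scores[j]).2 ≤ (scores[i]).2) ∧
      (∀ j : Fin scores.length, j.1 < i.1 → (scores[j]).2 < (scores[i]).2) := by
  unfold D_pick_intent_py
  constructor
  · intro h
    rcases hfind : scores.find? (fun p => scores.all (fun q => q.2 ≤ p.2)) with _ | p
    · rw [hfind] at h
      simp [Option.any] at h
    · rw [hfind] at h
      simp only [Option.any, Bool.and_eq_true, beq_iff_eq, decide_eq_true_eq] at h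
      obtain ⟨hk, hv⟩ := h
      have hfind' := hfind
      rw [List.find?_eq_some_iff_getElem] at hfind'
      obtain ⟨hp, i, hi, hpe, hprev⟩ := hfind'
      subst hpe
      refine ⟨⟨i, hi⟩, hk, hv, ?_, ?_⟩
      · intro j
        have := List.all_eq_true.1 hp _ (List.getElem_mem j.2)
        simpa using this
      · intro j hj
        have hnp := hprev j.1 hj
        simp only [Bool.not_eq_true', List.all_eq_false, decide_eq_false_iff_not, not_le] at hnp
        obtain ⟨q, hq, hlt⟩ := hnp
        have := List.all_eq_true.1 hp _ hq
        simp only [decide_eq_true_eq] at this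
        have hlt' : (scores[j]).2 < q.2 := by simpa using hlt
        have hle : q.2 ≤ (scores[(⟨i, hi⟩ : Fin scores.length)]).2 := this
        omega
  · rintro ⟨i, hk, hv, hmax, hfirst⟩
    have hfind : scores.find? (fun p => scores.all (fun q => q.2 ≤ p.2)) = some scores[i] := by
      rw [List.find?_eq_some_iff_getElem]
      refine ⟨?_, i.1, i.2, rfl, ?_⟩
      · rw [List.all_eq_true]
        intro q hq
        obtain ⟨j, hj, rfl⟩ := List.mem_iff_getElem.1 hq
        simpa using hmax ⟨j, hj⟩
      · intro j hj
        simp only [Bool.not_eq_true', List.all_eq_false, decide_eq_false_iff_not, not_le]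
        refine ⟨scores[i], List.getElem_mem i.2, ?_⟩
        simpa using hfirst ⟨j, lt_trans hj i.2⟩ hj
    rw [hfind]
    simp only [Option.any, Bool.and_eq_true, beq_iff_eq, decide_eq_true_eq]
    exact ⟨hk, hv⟩

theorem mem_tied_iff (scores : List (String × Int)) (v : Int) (s : String) :
    s ∈ (scores.filter (fun p => p.2 == v)).map Prod.fst
      ↔ ∃ j : Fin scores.length, (scores[j]).1 = s ∧ (scores[j]).2 = v := by
  constructor
  · intro h
    obtain ⟨p, hp, rfl⟩ := List.mem_map.1 h
    obtain ⟨hps, hpv⟩ := List.mem_filter.1 hp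
    obtain ⟨j, hj, rfl⟩ := List.mem_iff_getElem.1 hps
    exact ⟨⟨j, hj⟩, rfl, by simpa using hpv⟩
  · rintro ⟨j, rfl, hv⟩
    exact List.mem_map.2 ⟨scores[j], List.mem_filter.2 ⟨List.getElem_mem j.2, by simpa using hv⟩, rfl⟩

theorem contains_tied {scores : List (String × Int)} {v : Int} (j : Fin scores.length)
    (hv : (scores[j]).2 = v) :
    ((scores.filter (fun p => p.2 == v)).map Prod.fst).contains (scores[j]).1 = true := by
  rw [List.contains_iff_mem, mem_tied_iff]
  exact ⟨j, rfl, hv⟩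

theorem main_unchanged (scores : List (String × Int)) (hD : ¬ D_pick_intent_py scores) :
    pick_intent_py scores = pick_intent_py_alt scores := by
  rcases foldA_char scores ("", 0) with ⟨heq, hall⟩ | ⟨i, heq, hpos, hmax, hfirst⟩
  · -- best_score stayed 0: A returns ("general", 0)
    have hA : pick_intent_py scores = ("general", 0) := by
      simp only [pick_intent_py]
      rw [heq, if_pos rfl]
    rcases eq_or_ne scores [] with rfl | hnil
    · rw [hA]; rfl
    · obtain ⟨i1, hmeq, hmax1, hfirst1⟩ := maxB_char scores hnil
      have hB : pick_intent_py_alt scores = ("general", 0) := by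
        simp only [pick_intent_py_alt]
        rw [hmeq]
        show (if (scores[i1]).2 ≤ 0 then (("general":String), (0:Int)) else ((scores[i1]).1, (scores[i1]).2)) = ("general", 0)
        rw [if_pos (by simpa using hall _ (List.getElem_mem i1.2))]
      rw [hA, hB]
  · have hpos' : (0:Int) < (scores[i]).2 := hpos
    have hkey : ¬ (scores[i]).1 = "" := fun hk => hD ((D_iff scores).2 ⟨i, hk, hpos', hmax, hfirst⟩)
    have hnil : scores ≠ [] := by
      intro h
      exact absurd i.2 (by simp [h])
    obtain ⟨i1, hmeq, hmax1, hfirst1⟩ := maxB_char scores hnil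
    have hv1 : (scores[i1]).2 = (scores[i]).2 := by
      have h1 := hmax i1
      have h2 := hmax1 i
      unfold Klt at h2
      omega
    have hB : pick_intent_py_alt scores = ((scores[i1]).1, (scores[i1]).2) := by
      simp only [pick_intent_py_alt]
      rw [hmeq]
      show (if (scores[i1]).2 ≤ 0 then (("general":String), (0:Int)) else ((scores[i1]).1, (scores[i1]).2)) = ((scores[i1]).1, (scores[i1]).2)
      rw [if_neg (by omega : ¬ (scores[i1]).2 ≤ 0)]
    have hA1 : pick_intent_py scores =
        (if 1 < ((scores.filter (fun p => p.2 == (scores[i]).2)).map Prod.fst).length then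
          match pvPriority.find? (fun intent => ((scores.filter (fun p => p.2 == (scores[i]).2)).map Prod.fst).contains intent) with
          | some intent => (intent, (scores[i]).2)
          | none => scores[i]
        else scores[i]) := by
      simp only [pick_intent_py]
      rw [heq, if_neg hkey]
    by_cases hlen : 1 < ((scores.filter (fun p => p.2 == (scores[i]).2)).map Prod.fst).length
    · rcases hfind : pvPriority.find? (fun intent => ((scores.filter (fun p => p.2 == (scores[i]).2)).map Prod.fst).contains intent) with _ | p
      · -- no priority intent among the tied: first maximum wins on both sides
        rw [hA1, if_pos hlen, hfind, hB]
        have hnotc := List.find?_eq_none.1 hfind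
        have hii : i.1 = i1.1 := by
          rcases Nat.lt_trichotomy i.1 i1.1 with hlt | heq' | hgt
          · have hk1 := hfirst1 i hlt
            unfold Klt at hk1
            have hr9 : rk (scores[i1]).1 < 9 := by
              have := rk_le_nine (scores[i]).1
              omega
            exact absurd (contains_tied i1 hv1) (by
              simpa using hnotc _ (rk_lt_nine_mem hr9))
          · exact heq'
          · have := hfirst i1 hgt
            omega
        have he : i = i1 := Fin.ext hii
        rw [he]
      · -- priority intent p wins on both sides
        rw [hA1, if_pos hlen, hfind, hB]
        obtain ⟨hcp, hpmem, hmin⟩ := find?_rk_min hfind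
        obtain ⟨j, hj1, hj2⟩ := (mem_tied_iff scores (scores[i]).2 p).1 (List.contains_iff_mem.1 hcp)
        have hrkp : rk p < 9 := mem_rk_lt hpmem
        have hle1 : rk (scores[i1]).1 ≤ rk p := by
          have h2 := hmax1 j
          unfold Klt at h2
          rw [hj1] at h2
          omega
        have hge1 : rk p ≤ rk (scores[i1]).1 := by
          refine hmin _ (contains_tied i1 hv1) (rk_lt_nine_mem ?_)
          omega
        have hkeq : p = (scores[i1]).1 := rk_inj hrkp (by omega)
        rw [← hkeq, hv1]
    · rw [hA1, if_neg hlen, hB]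
      have hmemA : scores[i] ∈ scores.filter (fun p => p.2 == (scores[i]).2) := by
        rw [List.mem_filter]
        exact ⟨List.getElem_mem i.2, by simp⟩
      have hmemB : scores[i1] ∈ scores.filter (fun p => p.2 == (scores[i]).2) := by
        rw [List.mem_filter]
        exact ⟨List.getElem_mem i1.2, by simpa using hv1⟩
      have hlen' : (scores.filter (fun p => p.2 == (scores[i]).2)).length ≤ 1 := by
        rw [List.length_map] at hlen
        omega
      rw [tied_singleton hlen' hmemA hmemB]

-- ===== VERDICT (by name: the statement is the Claim_ definition above) =====
theorem pick_intent_py_spec : Claim_unchanged_pick_intent_py := by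
  intro scores _ hD
  exact main_unchanged scores hD

theorem pick_intent_py_changed : Claim_changed_pick_intent_py := by
  unfold Claim_changed_pick_intent_py; decide

theorem pick_intent_py_tight : Claim_exact_pick_intent_py := by
  intro scores _ hDin
  obtain ⟨i, hk, hv, hmax, hfirst⟩ := (D_iff scores).1 hDin
  have hA : pick_intent_py scores = ("general", 0) := by
    simp only [pick_intent_py]
    rcases foldA_char scores ("", 0) with ⟨heq, hall⟩ | ⟨i', heq, hpos, hmax', hfirst'⟩
    · rw [heq, if_pos rfl]
    · have hii : i'.1 = i.1 := by
        rcases Nat.lt_trichotomy i'.1 i.1 with hlt | he | hgt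
        · have h1 := hfirst i' hlt
          have h2 := hmax' i
          omega
        · exact he
        · have h1 := hfirst' i hgt
          have h2 := hmax i'
          omega
      have he : i' = i := Fin.ext hii
      rw [he] at heq
      rw [heq, if_pos hk]
  have hnil : scores ≠ [] := fun h => absurd i.2 (by simp [h])
  obtain ⟨i1, hmeq, hmax1, hfirst1⟩ := maxB_char scores hnil
  have hv1 : (scores[i1]).2 = (scores[i]).2 := by
    have h1 := hmax i1
    have h2 := hmax1 i
    unfold Klt at h2
    omega
  have hB : pick_intent_py_alt scores = ((scores[i1]).1, (scores[i1]).2) := by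
    simp only [pick_intent_py_alt]
    rw [hmeq]
    show (if (scores[i1]).2 ≤ 0 then (("general":String), (0:Int)) else ((scores[i1]).1, (scores[i1]).2)) = _
    rw [if_neg (by omega)]
  rw [hA, hB]
  intro hcon
  have h0 := congrArg Prod.snd hcon
  simp only [] at h0
  omega
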